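-- pv_equiv track=rewrite | github.com/fivegrainja/adventofcode2017 | dec24/part2-faster.py | get_longest_bridges
-- ===== SOURCE A (Python) =====
-- def get_longest_bridges(bridges):
--     max_length = 0
--     longest = []
--     for b in bridges:
--         l = len(b)
--         if l > max_length:
--             max_length = l
--             longest = [b]
--         elif l == max_length:
--             longest.append(b)
--     return longest
-- ===== SOURCE B (Python) =====
-- def get_longest_bridges(bridges):
--     m = max((len(b) for b in bridges), default=0)
--     return [b for b in bridges if len(b) == m]
-- ===== Notes on version B (the rewrite author's own statement) =====
-- stated objective: simpler
-- what changed: Replaces the single running-max-and-collect loop with two plain passes: compute the maximum length (default 0), then filter the bridges of that length.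
import Mathlib
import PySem

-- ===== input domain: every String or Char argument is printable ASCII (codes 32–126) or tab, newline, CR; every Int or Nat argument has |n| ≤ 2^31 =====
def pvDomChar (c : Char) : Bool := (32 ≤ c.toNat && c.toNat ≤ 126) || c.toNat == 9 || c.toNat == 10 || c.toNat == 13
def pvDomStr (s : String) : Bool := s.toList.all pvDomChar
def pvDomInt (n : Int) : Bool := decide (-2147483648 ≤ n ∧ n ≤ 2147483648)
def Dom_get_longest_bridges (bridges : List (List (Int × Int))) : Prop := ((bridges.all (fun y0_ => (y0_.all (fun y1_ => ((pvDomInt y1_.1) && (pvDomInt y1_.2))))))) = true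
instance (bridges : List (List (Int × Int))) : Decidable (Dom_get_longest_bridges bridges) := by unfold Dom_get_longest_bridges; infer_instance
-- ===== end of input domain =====

-- ===== PORT A =====
-- B is a two-pass decomposition (max then filter) of A's single running-max loop; outputs proved equal.
def get_longest_bridges (bridges : List (List (Int × Int))) : List (List (Int × Int)) :=
  (bridges.foldl
    (fun (st : Int × List (List (Int × Int))) b =>
      let l : Int := (b.length : Int)
      if l > st.1 then (l, [b])
      else if l == st.1 then (st.1, st.2 ++ [b])
      else st)
    ((0 : Int), ([] : List (List (Int × Int))))).2

-- ===== PORT B =====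
def get_longest_bridges_alt (bridges : List (List (Int × Int))) : List (List (Int × Int)) :=
  let m : Int := bridges.foldl (fun acc b => max acc (b.length : Int)) 0
  bridges.filter (fun b => (b.length : Int) == m)

-- ===== PRECONDITION & SPEC =====
def Spec_get_longest_bridges (bridges : List (List (Int × Int))) (out : List (List (Int × Int))) : Prop := out = get_longest_bridges_alt bridges
instance (bridges : List (List (Int × Int))) (out : List (List (Int × Int))) : Decidable (Spec_get_longest_bridges bridges out) := by unfold Spec_get_longest_bridges; infer_instance

-- ===== CLAIM (what is proved, stated in full; the proofs are below) =====
def Claim_equal_get_longest_bridges : Prop := ∀ (bridges : List (List (Int × Int))), Dom_get_longest_bridges bridges → Spec_get_longest_bridges bridges (get_longest_bridges bridges)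

-- ===== LEMMAS AND PROOFS =====

-- ===== VERDICT (by name: the statement is the Claim_ definition above) =====
-- invariant of A's loop: from state (m, acc), the final collected list is
-- acc (kept iff the max never rises) followed by the suffix's bridges of maximal length
theorem foldA_invariant (rest : List (List (Int × Int))) :
    ∀ (m : Int) (acc : List (List (Int × Int))),
    (rest.foldl
      (fun (st : Int × List (List (Int × Int))) b =>
        let l : Int := (b.length : Int)
        if l > st.1 then (l, [b])
        else if l == st.1 then (st.1, st.2 ++ [b])
        else st) (m, acc)).2
    = (if rest.foldl (fun acc b => max acc (b.length : Int)) m = m then acc else [])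
      ++ rest.filter (fun b => (b.length : Int) == rest.foldl (fun acc b => max acc (b.length : Int)) m) := by
  induction rest with
  | nil => intro m acc; simp
  | cons b rest ih =>
    intro m acc
    have hM : ∀ m' : Int, m' ≤ rest.foldl (fun acc b => max acc (b.length : Int)) m' := by
      intro m'
      exact (PySem.List.le_foldl_max_int rest (fun b => (b.length : Int)) m').1
    by_cases h1 : (b.length : Int) > m
    · have hmax : max m (b.length : Int) = (b.length : Int) := by omega
      simp only [List.foldl_cons, hmax, if_pos h1]
      rw [ih]
      have hMl := hM (b.length : Int)
      by_cases h2 : rest.foldl (fun acc b => max acc (b.length : Int)) (b.length : Int) = (b.length : Int)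
      · have hne : ¬ rest.foldl (fun acc b => max acc (b.length : Int)) (b.length : Int) = m := by omega
        simp [h2]
        intro h; exact absurd h (by omega)
      · have hbne : ((b.length : Int) == rest.foldl (fun acc b => max acc (b.length : Int)) (b.length : Int)) = false := by
          simp; omega
        simp [h2, hbne]
        intro h; exact absurd h (by omega)
    · by_cases h2 : (b.length : Int) = m
      · have hmax : max m (b.length : Int) = m := by omega
        simp only [List.foldl_cons, h2, beq_self_eq_true, if_true]
        -- b has exactly the current max length: appended
        rw [ih]
        have hMl := hM m
        by_cases h3 : rest.foldl (fun acc b => max acc (b.length : Int)) m = m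
        · simp [h3, h2]
        · have hbne : ((b.length : Int) == rest.foldl (fun acc b => max acc (b.length : Int)) m) = false := by
            simp; omega
          simp [h3, hbne]
      · have hlt : (b.length : Int) < m := by omega
        have hmax : max m (b.length : Int) = m := by omega
        have hb2 : ((b.length : Int) == m) = false := by simp [h2]
        simp only [List.foldl_cons, hmax, if_neg h1, hb2, Bool.false_eq_true, if_false]
        rw [ih]
        have hMl := hM m
        have hbne : ((b.length : Int) == rest.foldl (fun acc b => max acc (b.length : Int)) m) = false := by
          simp; omega
        simp [hbne]

theorem get_longest_bridges_spec : Claim_equal_get_longest_bridges := by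
  intro bridges _
  unfold Spec_get_longest_bridges get_longest_bridges get_longest_bridges_alt
  rw [foldA_invariant]
  by_cases h : bridges.foldl (fun acc b => max acc (b.length : Int)) 0 = 0 <;> simp [h]
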